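-- pv_equiv track=rewrite | github.com/daniel-reich/turbo-robot | ANdoCvhhaEibypkDE_19.py | closing_in_sum
-- ===== SOURCE A (Python) =====
-- import math
--
-- def closing_in_sum(n):
--   n = str(n)
--   if int(len(n))%2 == 0:
--     gb = [n[i] +n[-i-1] for i in range(int(len(n)/2))]
--     return (sum([int(i) for i in gb]))
--   else:
--     bb = [n[i] +n[-i-1] for i in range(math.floor(int(len(n)/2)))]
--     return (sum([int(i) for i in bb])) + int(n[len(n)//2])
-- ===== SOURCE B (Python) =====
-- def closing_in_sum(n):
--     def go(s):
--         if len(s) == 0: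
--             return 0
--         if len(s) == 1:
--             return int(s)
--         return int(s[0] + s[-1]) + go(s[1:-1])
--     return go(str(n))
-- ===== Notes on version B (the rewrite author's own statement) =====
-- stated objective: simpler
-- what changed: Replaces A's parity split with index-range comprehensions over half the string by a single recursion that peels the first and last character off the string until at most one remains; no length/parity/index arithmetic is needed.
import Mathlib
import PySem

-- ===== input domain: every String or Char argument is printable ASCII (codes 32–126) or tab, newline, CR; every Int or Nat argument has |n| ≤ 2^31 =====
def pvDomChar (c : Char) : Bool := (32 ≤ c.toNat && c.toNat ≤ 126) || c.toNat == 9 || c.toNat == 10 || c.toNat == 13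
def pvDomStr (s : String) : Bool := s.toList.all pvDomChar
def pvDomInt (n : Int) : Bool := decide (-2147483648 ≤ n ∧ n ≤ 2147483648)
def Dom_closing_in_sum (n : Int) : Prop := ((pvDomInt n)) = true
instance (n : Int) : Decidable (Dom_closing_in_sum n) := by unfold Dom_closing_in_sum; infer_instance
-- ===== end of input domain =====

-- B replaces A's parity-split index comprehensions by a recursion peeling first+last characters (objective: simpler).

-- ===== PORT A =====
-- A's body on the decimal string s = str(n); indices are always in range (i < len//2, -i-1 ≥ -len),
-- so pyGetD is exact here.  int(len(n)/2) truncates a nonnegative float, i.e. equals len(n)//2,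
-- and math.floor(int(len(n)/2)) is the same value; both are ported as floordiv.
def pvBodyA (s : List Char) : Int :=
  if PySem.Int.mod (s.length : Int) 2 = 0 then
    (((PySem.List.pyRange 0 (PySem.Int.floordiv (s.length : Int) 2) 1).map
        (fun i => [PySem.List.pyGetD s i ' ', PySem.List.pyGetD s (-i - 1) ' '])).map
      (fun cs => (PySem.Int.ofChars? cs).getD 0)).sum
  else
    (((PySem.List.pyRange 0 (PySem.Int.floordiv (s.length : Int) 2) 1).map
        (fun i => [PySem.List.pyGetD s i ' ', PySem.List.pyGetD s (-i - 1) ' '])).map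
      (fun cs => (PySem.Int.ofChars? cs).getD 0)).sum
    + (PySem.Int.ofChars? [PySem.List.pyGetD s (PySem.Int.floordiv (s.length : Int) 2) ' ']).getD 0

def closing_in_sum (n : Int) : Int := pvBodyA (PySem.Int.toChars n)

-- ===== PORT B =====
-- go(s): 0 for "", int(s) for one char, else int(s[0]+s[-1]) + go(s[1:-1]).
def pvGo : List Char → Int
  | [] => 0
  | [c] => (PySem.Int.ofChars? [c]).getD 0
  | c :: d :: cs =>
      (PySem.Int.ofChars? [c, (d :: cs).getLastD ' ']).getD 0 + pvGo ((d :: cs).dropLast)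
termination_by s => s.length
decreasing_by simp [List.length_dropLast]

def closing_in_sum_alt (n : Int) : Int := pvGo (PySem.Int.toChars n)

-- ===== PRECONDITION & SPEC =====
def Spec_closing_in_sum (n : Int) (out : Int) : Prop := out = closing_in_sum_alt n
instance (n : Int) (out : Int) : Decidable (Spec_closing_in_sum n out) := by unfold Spec_closing_in_sum; infer_instance

-- ===== CLAIM (what is proved, stated in full; the proofs are below) =====
def Claim_equal_closing_in_sum : Prop := ∀ (n : Int), Dom_closing_in_sum n → Spec_closing_in_sum n (closing_in_sum n)

-- ===== LEMMAS AND PROOFS =====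

-- A's body rephrased over Nat ranges and List.getD (proof-side normal form).
def pvPairSum (s : List Char) : Int :=
  ((List.range (s.length / 2)).map
    (fun j => (PySem.Int.ofChars? [s.getD j ' ', s.getD (s.length - 1 - j) ' ']).getD 0)).sum

def pvNatBody (s : List Char) : Int :=
  pvPairSum s +
    (if s.length % 2 = 1 then (PySem.Int.ofChars? [s.getD (s.length / 2) ' ']).getD 0 else 0)

lemma pvBodyA_eq_natBody (s : List Char) : pvBodyA s = pvNatBody s := by
  rw [pvBodyA, pvNatBody, pvPairSum]
  have hm2 : PySem.Int.mod ((s.length : Nat) : Int) 2 = ((s.length % 2 : Nat) : Int) := by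
    exact_mod_cast PySem.Int.mod_natCast s.length 2
  have hd2 : PySem.Int.floordiv ((s.length : Nat) : Int) 2 = ((s.length / 2 : Nat) : Int) := by
    exact_mod_cast PySem.Int.floordiv_natCast s.length 2
  rw [hm2, hd2, PySem.List.pyRange_zero_natCast, List.map_map, List.map_map]
  have key : ∀ j ∈ List.range (s.length / 2),
      (((fun cs => (PySem.Int.ofChars? cs).getD 0) ∘
          (fun i => [PySem.List.pyGetD s i ' ', PySem.List.pyGetD s (-i - 1) ' '])) ∘
        (fun k : Nat => (k : Int))) j
      = (PySem.Int.ofChars? [s.getD j ' ', s.getD (s.length - 1 - j) ' ']).getD 0 := by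
    intro j hj
    rw [List.mem_range] at hj
    simp only [Function.comp_apply]
    have e1 : PySem.List.pyGetD s (j : Int) ' ' = s.getD j ' ' :=
      PySem.List.pyGetD_natCast s j ' '
    have hc : (-(j : Int) - 1) = -(((j + 1 : Nat) : Int)) := by push_cast; ring
    have e2 : PySem.List.pyGetD s (-(j : Int) - 1) ' ' = s.getD (s.length - 1 - j) ' ' := by
      rw [hc, PySem.List.pyGetD_neg_natCast s (j + 1) ' ' (by omega) (by omega : j + 1 ≤ s.length)]
      rw [List.getD_eq_getElem s ' ' (show s.length - 1 - j < s.length by omega)]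
      simp only [show s.length - (j + 1) = s.length - 1 - j from by omega]
    rw [e1, e2]
  rw [List.map_congr_left key]
  split_ifs with ha hb
  · exact absurd ha (by omega)
  · ring
  · have hmid : PySem.List.pyGetD s (((s.length / 2 : Nat) : Int)) ' ' = s.getD (s.length / 2) ' ' :=
      PySem.List.pyGetD_natCast s (s.length / 2) ' '
    rw [hmid]
  · exact absurd (by omega : ((s.length % 2 : Nat) : Int) = 0) ha

lemma pvPairSum_step (a b : Char) (xs : List Char) :
    pvPairSum (a :: (xs ++ [b])) = (PySem.Int.ofChars? [a, b]).getD 0 + pvPairSum xs := by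
  rw [pvPairSum, pvPairSum]
  have hl : (a :: (xs ++ [b])).length = xs.length + 2 := by simp
  rw [hl]
  have hd : (xs.length + 2) / 2 = xs.length / 2 + 1 := by omega
  rw [hd, List.range_succ_eq_map, List.map_cons, List.map_map, List.sum_cons]
  congr 1
  · have h1 : (a :: (xs ++ [b])).getD (xs.length + 2 - 1 - 0) ' ' = b := by
      have he : xs.length + 2 - 1 - 0 = xs.length + 1 := by omega
      rw [he, List.getD_cons_succ, List.getD_eq_getElem?_getD, List.getElem?_concat_length]
      rfl
    rw [h1, List.getD_cons_zero]
  · refine congrArg List.sum (List.map_congr_left ?_)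
    intro j hj
    rw [List.mem_range] at hj
    have hjk : j < xs.length := by omega
    have hk1 : 1 ≤ xs.length := by omega
    simp only [Function.comp_apply]
    have e1 : (a :: (xs ++ [b])).getD (j + 1) ' ' = xs.getD j ' ' := by
      rw [List.getD_cons_succ, List.getD_append _ _ _ _ hjk]
    have e2 : (a :: (xs ++ [b])).getD (xs.length + 2 - 1 - (j + 1)) ' ' = xs.getD (xs.length - 1 - j) ' ' := by
      have he : xs.length + 2 - 1 - (j + 1) = (xs.length - 1 - j) + 1 := by omega
      rw [he, List.getD_cons_succ, List.getD_append _ _ _ _ (by omega : xs.length - 1 - j < xs.length)]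
    rw [Nat.succ_eq_add_one, e1, e2]

lemma pvNatBody_step (a b : Char) (xs : List Char) :
    pvNatBody (a :: (xs ++ [b])) = (PySem.Int.ofChars? [a, b]).getD 0 + pvNatBody xs := by
  rw [pvNatBody, pvNatBody, pvPairSum_step]
  have hl : (a :: (xs ++ [b])).length = xs.length + 2 := by simp
  rw [hl]
  by_cases hp : xs.length % 2 = 1
  · rw [if_pos hp, if_pos (by omega : (xs.length + 2) % 2 = 1)]
    have hd : (xs.length + 2) / 2 = xs.length / 2 + 1 := by omega
    have hmid : (a :: (xs ++ [b])).getD ((xs.length + 2) / 2) ' ' = xs.getD (xs.length / 2) ' ' := by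
      rw [hd, List.getD_cons_succ, List.getD_append _ _ _ _ (by omega : xs.length / 2 < xs.length)]
    rw [hmid]; ring
  · rw [if_neg hp, if_neg (by omega : ¬ (xs.length + 2) % 2 = 1)]; ring

lemma pvGo_step (a b : Char) (xs : List Char) :
    pvGo (a :: (xs ++ [b])) = (PySem.Int.ofChars? [a, b]).getD 0 + pvGo xs := by
  cases xs with
  | nil => simp [pvGo]
  | cons x xs' =>
      show pvGo (a :: x :: (xs' ++ [b])) = _
      rw [pvGo]
      have h1 : (x :: (xs' ++ [b])).getLastD ' ' = b := by
        rw [show x :: (xs' ++ [b]) = (x :: xs') ++ [b] from rfl, List.getLastD_eq_getLast?,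
          List.getLast?_concat]
        rfl
      have h2 : (x :: (xs' ++ [b])).dropLast = x :: xs' := by
        rw [show x :: (xs' ++ [b]) = (x :: xs') ++ [b] from rfl, List.dropLast_concat]
      rw [h1, h2]

lemma pvNatBody_eq_go (s : List Char) : pvNatBody s = pvGo s := by
  induction s using List.bidirectionalRec with
  | nil => simp [pvNatBody, pvPairSum, pvGo]
  | singleton c => simp [pvNatBody, pvPairSum, pvGo]
  | cons_append a xs b ih => rw [pvNatBody_step, pvGo_step, ih]

-- ===== VERDICT (by name: the statement is the Claim_ definition above) =====
theorem closing_in_sum_spec : Claim_equal_closing_in_sum := by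
  intro n _
  show closing_in_sum n = closing_in_sum_alt n
  unfold closing_in_sum closing_in_sum_alt
  rw [pvBodyA_eq_natBody, pvNatBody_eq_go]
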